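-- pv_equiv track=rewrite | github.com/rwstephenson/advent | 2023/dec13/dec13.py | cleanHorizontal
-- ===== SOURCE A (Python) =====
-- def checkForHorizontalMirror(x,block):
--     numDiff = 0
--     smudgeX = 0
--     smudgeY = 0
--     for y in range(len(block)):
--         blockLine = block[y]
--         i = 0
--         while x+i+1 < len(blockLine) and x-i >= 0:
--             if blockLine[x-i] == blockLine[x+i+1]:
--                 i += 1
--             else:
--                 numDiff += 1
--                 smudgeX = x-i
--                 smudgeY = y
--                 i += 1
--     return numDiff, smudgeX, smudgeY
--
-- def cleanHorizontal(block):
--     foundSmudge = False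
--     foundX = 0
--     foundY = 0
--     for x in range(0,len(block[0])-1):
--         numDiff,smudgeX,smudgeY = checkForHorizontalMirror(x,block)
--         if numDiff == 1:
--             assert(not foundSmudge)
--             foundSmudge = True
--             foundX = smudgeX
--             foundY = smudgeY
--     return foundSmudge,foundX,foundY
-- ===== SOURCE B (Python) =====
-- def cleanHorizontal(block):
--     # Different algorithm: enumerate every mismatched column pair (c1,c2) of the
--     # grid ONCE (odd-sum pairs only), tagging each with its unique reflection
--     # axis via the closed form axis = (c1+c2-1)//2 (a pair (c1,c2) is mirrored
--     # about axis x iff c1+c2 == 2*x+1); then pick the axis with exactly one hit.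
--     cells = []
--     for y, row in enumerate(block):
--         L = len(row)
--         for c2 in range(1, L):
--             for c1 in range(c2):
--                 if (c1 + c2) % 2 == 1 and row[c1] != row[c2]:
--                     cells.append(((c1 + c2 - 1) // 2, c1, y))
--     for x in range(len(block[0]) - 1):
--         hits = [c for c in cells if c[0] == x]
--         if len(hits) == 1:
--             return True, hits[0][1], hits[0][2]
--     return False, 0, 0
-- ===== Notes on version B (the rewrite author's own statement) =====
-- stated objective: alternative
-- what changed: Instead of A's axis-outer loop that re-walks the mirror around every candidate axis row by row, B makes one pass over the grid enumerating every mismatched odd-sum column pair, tags each with its unique axis via the closed form axis=(c1+c2-1)//2, and then simply picks the axis with exactly one tagged cell.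
import Mathlib
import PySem

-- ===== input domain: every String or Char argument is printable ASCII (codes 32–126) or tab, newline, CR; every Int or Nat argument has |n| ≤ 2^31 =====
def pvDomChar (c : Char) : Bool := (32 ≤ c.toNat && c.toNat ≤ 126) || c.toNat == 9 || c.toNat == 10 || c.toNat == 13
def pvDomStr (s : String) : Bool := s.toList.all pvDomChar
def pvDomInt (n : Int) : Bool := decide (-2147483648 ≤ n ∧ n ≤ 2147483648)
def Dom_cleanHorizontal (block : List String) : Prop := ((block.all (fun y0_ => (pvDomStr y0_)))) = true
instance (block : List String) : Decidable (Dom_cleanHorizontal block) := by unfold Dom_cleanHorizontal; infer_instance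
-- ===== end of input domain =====

-- B replaces A's per-axis mirror walk by a single enumeration of all mismatched odd-sum column
-- pairs of the grid, each tagged with its unique axis (c1+c2-1)//2, then picks the axis with
-- exactly one tagged cell (objective: alternative algorithm, same asymptotic cost).

-- ===== PORT A =====
-- the 'while x+i+1 < len(blockLine) and x-i >= 0' loop of checkForHorizontalMirror;
-- fuel = len(blockLine)+1 strictly exceeds the iteration count (≤ len), so the loop
-- always ends by its own condition, exactly as in Python.
def cfhWhile (cs : List Char) (x y : Int) : Nat → Int → Int × Int × Int → Int × Int × Int
  | 0, _, st => st
  | fuel + 1, i, (nd, sx, sy) =>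
    if (x + i + 1 < (cs.length : Int)) ∧ (0 ≤ x - i) then
      if PySem.List.pyGet? cs (x - i) == PySem.List.pyGet? cs (x + i + 1) then
        cfhWhile cs x y fuel (i + 1) (nd, sx, sy)
      else
        cfhWhile cs x y fuel (i + 1) (nd + 1, x - i, y)
    else (nd, sx, sy)

def checkForHorizontalMirror (x : Int) (block : List String) : Int × Int × Int :=
  (PySem.List.enumerate block 0).foldl
    (fun st p => cfhWhile p.2.toList x p.1 (p.2.toList.length + 1) 0 st) (0, 0, 0)

def cleanHorizontal (block : List String) : Bool × Int × Int :=
  match block with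
  | [] => (false, 0, 0)  -- Python: block[0] raises IndexError here; outside Pre_
  | b0 :: _ =>
    (PySem.List.pyRange 0 ((PySem.Str.len b0 : Int) - 1) 1).foldl
      (fun st x =>
        let r := checkForHorizontalMirror x block
        if r.1 == 1 then
          -- Python asserts (not foundSmudge) here and raises if it already holds; outside Pre_
          (true, r.2.1, r.2.2)
        else st)
      (false, 0, 0)

-- ===== PORT B =====
-- inner 'for c1 in range(c2): if (c1+c2)%2 == 1 and row[c1] != row[c2]: cells.append(...)'
def bCellsInner (row : List Char) (y c2 : Int) (cells : List (Int × Int × Int)) :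
    List (Int × Int × Int) :=
  (PySem.List.pyRange 0 c2 1).foldl
    (fun cells c1 =>
      if (PySem.Int.mod (c1 + c2) 2 == 1) && (PySem.List.pyGet? row c1 != PySem.List.pyGet? row c2)
      then cells ++ [(PySem.Int.floordiv (c1 + c2 - 1) 2, c1, y)]
      else cells) cells

-- 'for c2 in range(1, L):'
def bCellsRow (y : Int) (row : List Char) (cells : List (Int × Int × Int)) :
    List (Int × Int × Int) :=
  (PySem.List.pyRange 1 ((row.length : Int)) 1).foldl
    (fun cells c2 => bCellsInner row y c2 cells) cells

-- 'for y, row in enumerate(block):'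
def bCells (block : List String) : List (Int × Int × Int) :=
  (PySem.List.enumerate block 0).foldl (fun cells p => bCellsRow p.1 p.2.toList cells) []

-- 'for x in range(len(block[0]) - 1):' with the early return; 'hits[0]' is headI under the
-- length == 1 guard, exactly Python's hits[0] there
def bScan (cells : List (Int × Int × Int)) : List Int → Bool × Int × Int
  | [] => (false, 0, 0)
  | x :: xs =>
    let hits := cells.filter (fun c => c.1 == x)
    if hits.length == 1 then (true, hits.headI.2.1, hits.headI.2.2) else bScan cells xs

def cleanHorizontal_alt (block : List String) : Bool × Int × Int :=
  match block with
  | [] => (false, 0, 0)  -- Source B: len(block[0]) raises IndexError here too; outside Pre_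
  | b0 :: _ => bScan (bCells block) (PySem.List.pyRange 0 ((PySem.Str.len b0 : Int) - 1) 1)

-- ===== PRECONDITION & SPEC =====
-- mismatched reflection cells of row cs about the axis between columns x and x+1
def misRow (x : Nat) (cs : List Char) : List Nat :=
  (List.range (min (x + 1) (cs.length - (x + 1)))).filter (fun j => cs[x - j]? != cs[x + 1 + j]?)

-- all mismatched cells of the block (scan order: rows outer), as (column, row) pairs
def misFrom (x : Nat) (rows : List String) (y : Int) : List (Int × Int) :=
  match rows with
  | [] => []
  | r :: rs => (misRow x r.toList).map (fun (j : Nat) => ((x : Int) - (j : Int), y)) ++ misFrom x rs (y + 1)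

-- number of candidate axes with exactly one mismatched cell
def qualCount (block : List String) : Nat :=
  match block with
  | [] => 0
  | b0 :: _ => (List.range (b0.toList.length - 1)).countP (fun x => (misFrom x block 0).length == 1)

-- Pre_ excludes exactly the inputs where Python A raises: the empty block (IndexError on
-- block[0]) and blocks where two or more axes have exactly one mismatch (AssertionError).
def Pre_cleanHorizontal (block : List String) : Prop :=
  block ≠ [] ∧ qualCount block ≤ 1

instance (block : List String) : Decidable (Pre_cleanHorizontal block) := by
  unfold Pre_cleanHorizontal; infer_instance

def pvWitness_cleanHorizontal : List String := ["#.", "##"]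

def Spec_cleanHorizontal (block : List String) (out : Bool × Int × Int) : Prop :=
  out = cleanHorizontal_alt block
instance (block : List String) (out : Bool × Int × Int) : Decidable (Spec_cleanHorizontal block out) := by
  unfold Spec_cleanHorizontal; infer_instance

-- ===== CLAIM (what is proved, stated in full; the proofs are below) =====
def Claim_equal_cleanHorizontal : Prop :=
  ∀ (block : List String), Dom_cleanHorizontal block → Pre_cleanHorizontal block →
    Spec_cleanHorizontal block (cleanHorizontal block)

-- ===== LEMMAS AND PROOFS =====

-- ---- A side: checkForHorizontalMirror counts exactly the cells of misFrom ----

-- mismatches of row cs about axis x from position i on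
def misRowFrom (x i : Nat) (cs : List Char) : List Nat :=
  (List.range' i (min (x + 1) (cs.length - (x + 1)) - i)).filter
    (fun j => cs[x - j]? != cs[x + 1 + j]?)

lemma cfhWhile_eq (cs : List Char) (x : Nat) (y : Int) :
    ∀ (fuel i : Nat) (nd sx sy : Int),
      min (x + 1) (cs.length - (x + 1)) - i ≤ fuel →
      cfhWhile cs (x : Int) y fuel (i : Int) (nd, sx, sy) =
        ((misRowFrom x i cs).map (fun (j : Nat) => ((x : Int) - (j : Int), y))).foldl
          (fun st p => (st.1 + 1, p.1, p.2)) (nd, sx, sy) := by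
  intro fuel
  induction fuel with
  | zero =>
    intro i nd sx sy h
    simp [cfhWhile, misRowFrom, Nat.sub_eq_zero_of_le (by omega : min (x+1) (cs.length - (x+1)) ≤ i)]
  | succ fuel ih =>
    intro i nd sx sy h
    by_cases hlt : i < min (x + 1) (cs.length - (x + 1))
    · have hx : i ≤ x := by omega
      have hL : x + 1 + i < cs.length := by omega
      have e1 : (x : Int) - (i : Int) = ((x - i : Nat) : Int) := by push_cast [hx]; ring
      have e2 : (x : Int) + (i : Int) + 1 = ((x + 1 + i : Nat) : Int) := by push_cast; ring
      have e3 : (i : Int) + 1 = ((i + 1 : Nat) : Int) := by push_cast; ring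
      have hsub : min (x + 1) (cs.length - (x + 1)) - i
          = (min (x + 1) (cs.length - (x + 1)) - (i + 1)) + 1 := by omega
      rw [cfhWhile, if_pos (by constructor <;> [push_cast; skip] <;> omega), e1, e2, e3]
      rw [PySem.List.pyGet?_natCast, PySem.List.pyGet?_natCast]
      unfold misRowFrom
      rw [hsub, List.range'_succ, List.filter_cons]
      by_cases heq : cs[x - i]? == cs[x + 1 + i]?
      · have hb : (cs[x - i]? != cs[x + 1 + i]?) = false := by simp [bne, heq]
        rw [hb]
        rw [if_neg (show ¬(false = true) by simp), if_pos heq]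
        exact ih (i + 1) nd sx sy (by omega)
      · rw [Bool.not_eq_true] at heq
        have hb : (cs[x - i]? != cs[x + 1 + i]?) = true := by simp [bne, heq]
        rw [hb]
        rw [if_pos (show true = true from rfl), if_neg (by simp [heq])]
        simp only [List.map_cons, List.foldl_cons]
        rw [ih (i + 1) (nd + 1) _ y (by omega), e1]
        rfl
    · rw [cfhWhile, if_neg (by omega)]
      simp [misRowFrom, Nat.sub_eq_zero_of_le (by omega : min (x+1) (cs.length - (x+1)) ≤ i)]

lemma misRowFrom_zero (x : Nat) (cs : List Char) : misRowFrom x 0 cs = misRow x cs := by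
  simp [misRowFrom, misRow, List.range_eq_range']

lemma check_aux (x : Nat) :
    ∀ (rows : List String) (y0 : Int) (st : Int × Int × Int),
      (PySem.List.enumerate rows y0).foldl
          (fun st p => cfhWhile p.2.toList (x : Int) p.1 (p.2.toList.length + 1) 0 st) st =
        (misFrom x rows y0).foldl (fun st p => (st.1 + 1, p.1, p.2)) st := by
  intro rows
  induction rows with
  | nil => intro y0 st; simp [PySem.List.enumerate_nil, misFrom]
  | cons r rs ih =>
    intro y0 st
    obtain ⟨nd, sx, sy⟩ := st
    rw [PySem.List.enumerate_cons, List.foldl_cons]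
    have h0 : (0 : Int) = ((0 : Nat) : Int) := rfl
    rw [show (misFrom x (r :: rs) y0) = (misRow x r.toList).map
          (fun (j : Nat) => ((x : Int) - (j : Int), y0)) ++ misFrom x rs (y0 + 1) from rfl,
        List.foldl_append]
    rw [h0, cfhWhile_eq r.toList x y0 (r.toList.length + 1) 0 nd sx sy (by omega),
        misRowFrom_zero]
    exact ih (y0 + 1) _

lemma check_eq (x : Nat) (block : List String) :
    checkForHorizontalMirror (x : Int) block =
      (misFrom x block 0).foldl (fun st p => (st.1 + 1, p.1, p.2)) (0, 0, 0) := by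
  rw [checkForHorizontalMirror, check_aux x block 0 (0, 0, 0)]

lemma foldl_count_fst (l : List (Int × Int)) :
    ∀ st : Int × Int × Int,
      (l.foldl (fun st p => (st.1 + 1, p.1, p.2)) st).1 = st.1 + l.length := by
  induction l with
  | nil => intro st; simp
  | cons p t ih =>
    intro st
    rw [List.foldl_cons, ih]
    simp
    omega

lemma foldl_no_qual (q : Nat → Bool) (v : Nat → Bool × Int × Int) :
    ∀ (l : List Nat) (st : Bool × Int × Int), l.countP q = 0 →
      l.foldl (fun st x => if q x then v x else st) st = st := by
  intro l
  induction l with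
  | nil => intro st _; rfl
  | cons a t ih =>
    intro st h
    rw [List.countP_cons] at h
    have hqa : q a = false := by
      by_contra hc
      rw [Bool.not_eq_false] at hc
      simp [hc] at h
    rw [List.foldl_cons, if_neg (by simp [hqa])]
    exact ih st (by omega)

lemma foldl_last_eq_find (q : Nat → Bool) (v : Nat → Bool × Int × Int) :
    ∀ (l : List Nat), l.countP q ≤ 1 →
      l.foldl (fun st x => if q x then v x else st) (false, 0, 0) =
        (match l.find? q with | none => (false, 0, 0) | some x => v x) := by
  intro l
  induction l with
  | nil => intro _; rfl
  | cons a t ih =>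
    intro h
    rw [List.countP_cons] at h
    by_cases hqa : q a = true
    · rw [List.foldl_cons, if_pos hqa, List.find?_cons_of_pos hqa]
      exact foldl_no_qual q v t (v a) (by rw [if_pos hqa] at h; omega)
    · rw [Bool.not_eq_true] at hqa
      rw [List.foldl_cons, if_neg (by simp [hqa]), List.find?_cons_of_neg (by simp [hqa])]
      exact ih (by rw [if_neg (show ¬(q a = true) by simp [hqa])] at h; omega)

-- ---- B side: bCells filtered by an axis is exactly misFrom of that axis ----

def innerPred (cs : List Char) (c2 c1 : Int) : Bool :=
  (PySem.Int.mod (c1 + c2) 2 == 1) && (PySem.List.pyGet? cs c1 != PySem.List.pyGet? cs c2)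

def innerF (y c2 c1 : Int) : Int × Int × Int := (PySem.Int.floordiv (c1 + c2 - 1) 2, c1, y)

def rowCells (y : Int) (cs : List Char) : List (Int × Int × Int) :=
  (PySem.List.pyRange 1 ((cs.length : Int)) 1).flatMap
    (fun c2 => ((PySem.List.pyRange 0 c2 1).filter (innerPred cs c2)).map (innerF y c2))

lemma bCellsInner_eq (row : List Char) (y c2 : Int) (cells : List (Int × Int × Int)) :
    bCellsInner row y c2 cells =
      cells ++ ((PySem.List.pyRange 0 c2 1).filter (innerPred row c2)).map (innerF y c2) := by
  unfold bCellsInner innerPred innerF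
  exact PySem.List.foldl_append_if _ _ _ _

lemma bCellsRow_eq (y : Int) (row : List Char) (cells : List (Int × Int × Int)) :
    bCellsRow y row cells = cells ++ rowCells y row := by
  unfold bCellsRow rowCells
  rw [show (fun (cells : List (Int × Int × Int)) c2 => bCellsInner row y c2 cells)
      = fun cells c2 => cells ++ ((PySem.List.pyRange 0 c2 1).filter (innerPred row c2)).map (innerF y c2)
      from funext fun cells => funext fun c2 => bCellsInner_eq row y c2 cells]
  exact PySem.List.foldl_append_eq_flatMap _ _ _

lemma bCells_eq (block : List String) :
    bCells block = (PySem.List.enumerate block 0).flatMap (fun p => rowCells p.1 p.2.toList) := by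
  unfold bCells
  rw [show (fun (cells : List (Int × Int × Int)) (p : Int × String) => bCellsRow p.1 p.2.toList cells)
      = fun cells p => cells ++ rowCells p.1 p.2.toList
      from funext fun cells => funext fun p => bCellsRow_eq p.1 p.2.toList cells]
  rw [PySem.List.foldl_append_eq_flatMap]
  simp

lemma filter_range_unique (p : Nat → Bool) (k : Nat) (hp : ∀ m, p m = true → m = k) :
    ∀ n, (List.range n).filter p = if k < n ∧ p k = true then [k] else [] := by
  intro n
  induction n with
  | zero => simp
  | succ n ih =>
    rw [List.range_succ, List.filter_append, ih, List.filter_cons]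
    by_cases hn : p n = true
    · have := hp n hn
      subst this
      simp [hn]
    · rw [if_neg hn]
      by_cases hk : p k = true
      · have hkn : k ≠ n := fun h => hn (h ▸ hk)
        by_cases hlt : k < n
        · rw [if_pos ⟨hlt, hk⟩, if_pos ⟨by omega, hk⟩]; simp
        · rw [if_neg (by tauto), if_neg (by rintro ⟨h1, _⟩; omega)]; simp
      · rw [if_neg (by tauto), if_neg (by tauto)]; simp

lemma Qspec (cs : List Char) (y : Int) (x c2n m : Nat) (h1 : 1 ≤ c2n) :
    ((((fun c : Int × Int × Int => c.1 == (x : Int)) ∘ innerF y ((c2n : Nat) : Int))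
        ((m : Nat) : Int) && innerPred cs ((c2n : Nat) : Int) ((m : Nat) : Int)) = true)
      ↔ ((m + c2n) % 2 = 1 ∧ (m + c2n - 1) / 2 = x ∧ (cs[m]? != cs[c2n]?) = true) := by
  have e1 : (m : Int) + (c2n : Int) = ((m + c2n : Nat) : Int) := by push_cast; ring
  have e2 : (m : Int) + (c2n : Int) - 1 = ((m + c2n - 1 : Nat) : Int) := by
    push_cast [Nat.cast_sub (by omega : 1 ≤ m + c2n)]; ring
  simp only [Function.comp, innerPred, innerF, Bool.and_eq_true, beq_iff_eq]
  rw [e2, e1, show (2 : Int) = ((2 : Nat) : Int) from rfl, PySem.Int.mod_natCast,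
    PySem.Int.floordiv_natCast, PySem.List.pyGet?_natCast, PySem.List.pyGet?_natCast]
  constructor
  · rintro ⟨hdiv, hmod, hd⟩
    refine ⟨by exact_mod_cast hmod, by exact_mod_cast hdiv, hd⟩
  · rintro ⟨hmod, hdiv, hd⟩
    refine ⟨by exact_mod_cast hdiv, by exact_mod_cast hmod, hd⟩

lemma inner_filter (cs : List Char) (y : Int) (x c2n : Nat) (h1 : 1 ≤ c2n) :
    (((PySem.List.pyRange 0 (c2n : Int) 1).filter (innerPred cs (c2n : Int))).map
        (innerF y (c2n : Int))).filter (fun c => c.1 == (x : Int)) =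
      if x + 1 ≤ c2n ∧ c2n ≤ 2 * x + 1 ∧ (cs[2 * x + 1 - c2n]? != cs[c2n]?) = true
      then [((x : Int), ((2 * x + 1 - c2n : Nat) : Int), y)] else [] := by
  rw [List.filter_map, List.filter_filter, PySem.List.pyRange_zero_natCast, List.filter_map]
  have key : ∀ m, (((fun a : Int => ((fun c : Int × Int × Int => c.1 == (x : Int)) ∘ innerF y ((c2n : Nat) : Int)) a
        && innerPred cs ((c2n : Nat) : Int) a) ∘ fun k : Nat => (k : Int)) m) = true → m = 2 * x + 1 - c2n := by
    intro m hm
    have := (Qspec cs y x c2n m h1).mp hm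
    omega
  rw [filter_range_unique _ (2 * x + 1 - c2n) key c2n]
  by_cases hc : x + 1 ≤ c2n ∧ c2n ≤ 2 * x + 1 ∧ (cs[2 * x + 1 - c2n]? != cs[c2n]?) = true
  · obtain ⟨ha, hb, hd⟩ := hc
    have hQ : (((fun a : Int => ((fun c : Int × Int × Int => c.1 == (x : Int)) ∘ innerF y ((c2n : Nat) : Int)) a
        && innerPred cs ((c2n : Nat) : Int) a) ∘ fun k : Nat => (k : Int)) (2 * x + 1 - c2n)) = true := by
      exact (Qspec cs y x c2n (2 * x + 1 - c2n) h1).mpr ⟨by omega, by omega, hd⟩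
    rw [if_pos ⟨by omega, hQ⟩, if_pos ⟨ha, hb, hd⟩]
    simp only [List.map_cons, List.map_nil, innerF]
    have e2 : ((2 * x + 1 - c2n : Nat) : Int) + (c2n : Int) - 1 = ((2 * x : Nat) : Int) := by
      push_cast [Nat.cast_sub (by omega : c2n ≤ 2 * x + 1)]; ring
    rw [e2, show (2 : Int) = ((2 : Nat) : Int) from rfl, PySem.Int.floordiv_natCast]
    norm_num
  · rw [if_neg hc, if_neg ?hneg]
    · simp
    case hneg =>
      rintro ⟨hlt, hQ⟩
      have h3 := (Qspec cs y x c2n (2 * x + 1 - c2n) h1).mp hQ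
      exact hc ⟨by omega, by omega, by
        have : 2 * x + 1 - c2n + c2n = 2 * x + 1 := by omega
        exact h3.2.2⟩

lemma flatMap_ite_singleton {α : Type} (l : List Nat) (p : Nat → Prop) [DecidablePred p]
    (f : Nat → α) :
    l.flatMap (fun k => if p k then [f k] else []) =
      (l.filter (fun k => decide (p k))).map f := by
  induction l with
  | nil => rfl
  | cons a t ih =>
    rw [List.flatMap_cons, ih, List.filter_cons]
    by_cases hp : p a
    · simp [hp]
    · simp [hp]

lemma filter_range_window (n a m : Nat) (P : Nat → Bool)
    (h : ∀ k, k < n → P k = true → a ≤ k ∧ k < a + m) (hnm : a + m ≤ n) :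
    (List.range n).filter P = (List.range' a m).filter P := by
  have hsplit : List.range n = List.range' 0 a ++ List.range' a m ++ List.range' (a + m) (n - a - m) := by
    rw [List.range_eq_range']
    rw [show List.range' a m = List.range' (0 + 1 * a) m by norm_num, List.range'_append]
    rw [show List.range' (a + m) (n - a - m) = List.range' (0 + 1 * (a + m)) (n - a - m) by norm_num,
      List.range'_append]
    congr 1
    omega
  rw [hsplit, List.filter_append, List.filter_append]
  have h1 : (List.range' 0 a).filter P = [] := by
    rw [List.filter_eq_nil_iff]
    intro k hk
    obtain ⟨i, hi, rfl⟩ := List.mem_range'.mp hk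
    intro hPk
    have := h _ (by omega) hPk
    omega
  have h2 : (List.range' (a + m) (n - a - m)).filter P = [] := by
    rw [List.filter_eq_nil_iff]
    intro k hk
    obtain ⟨i, hi, rfl⟩ := List.mem_range'.mp hk
    intro hPk
    have := h _ (by omega) hPk
    omega
  rw [h1, h2]
  simp

lemma rowCells_filter (cs : List Char) (y : Int) (x : Nat) :
    (rowCells y cs).filter (fun c => c.1 == (x : Int)) =
      (misRow x cs).map (fun (j : Nat) => ((x : Int), (x : Int) - (j : Int), y)) := by
  set K := min (x + 1) (cs.length - (x + 1)) with hK
  rw [rowCells, List.filter_flatMap, PySem.List.pyRange_one, List.flatMap_map]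
  have htn : (((cs.length : Int)) - 1).toNat = cs.length - 1 := by omega
  rw [htn]
  have hcast : ∀ k : Nat, (1 : Int) + (k : Nat) = ((k + 1 : Nat) : Int) := by
    intro k; push_cast; ring
  have hbody : ∀ k ∈ List.range (cs.length - 1),
      (fun a : Nat => List.filter (fun c => c.1 == (x : Int))
          (List.map (innerF y (1 + (a : Int)))
            (List.filter (innerPred cs (1 + (a : Int))) (PySem.List.pyRange 0 (1 + (a : Int)) 1)))) k
        = if x ≤ k ∧ k ≤ 2 * x ∧ (cs[2 * x - k]? != cs[k + 1]?) = true
          then [((x : Int), ((2 * x - k : Nat) : Int), y)] else [] := by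
    intro k _
    dsimp only
    rw [hcast k]
    rw [inner_filter cs y x (k + 1) (by omega)]
    have e : 2 * x + 1 - (k + 1) = 2 * x - k := by omega
    rw [e]
    simp only [Nat.add_le_add_iff_right]
  rw [List.flatMap_congr hbody]
  rw [flatMap_ite_singleton (List.range (cs.length - 1))
    (fun k => x ≤ k ∧ k ≤ 2 * x ∧ (cs[2 * x - k]? != cs[k + 1]?) = true)
    (fun k => ((x : Int), ((2 * x - k : Nat) : Int), y))]
  by_cases hlen : cs.length ≤ x + 1
  · have hK0 : K = 0 := by omega
    have hnil : (List.range (cs.length - 1)).filter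
        (fun k => decide (x ≤ k ∧ k ≤ 2 * x ∧ (cs[2 * x - k]? != cs[k + 1]?) = true)) = [] := by
      rw [List.filter_eq_nil_iff]
      intro k hk
      rw [List.mem_range] at hk
      simp only [decide_eq_true_eq, not_and]
      intro hxk
      omega
    rw [hnil, misRow, ← hK, hK0]
    simp
  · have hwin := filter_range_window (cs.length - 1) x K
      (fun k => decide (x ≤ k ∧ k ≤ 2 * x ∧ (cs[2 * x - k]? != cs[k + 1]?) = true))
      (by
        intro k hk hPk
        simp only [decide_eq_true_eq] at hPk
        constructor
        · exact hPk.1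
        · have h2 := hPk.2.1
          omega)
      (by omega)
    rw [hwin, List.range'_eq_map_range, List.filter_map, List.map_map]
    have hfc : (List.range K).filter
        ((fun k => decide (x ≤ k ∧ k ≤ 2 * x ∧ (cs[2 * x - k]? != cs[k + 1]?) = true)) ∘ (fun j => x + j))
        = (List.range K).filter (fun j => cs[x - j]? != cs[x + 1 + j]?) := by
      apply List.filter_congr
      intro j hj
      rw [List.mem_range] at hj
      have hjx : j ≤ x := by omega
      have e1 : 2 * x - (x + j) = x - j := by omega
      have e2 : x + j + 1 = x + 1 + j := by omega
      simp only [Function.comp, e1, e2]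
      have h2 : x + j ≤ 2 * x := by omega
      simp only [h2, Nat.le_add_right, true_and, bne]
      by_cases hc : cs[x - j]? = cs[x + 1 + j]? <;> simp [hc]
    rw [hfc, misRow, ← hK]
    apply List.map_congr_left
    intro j hj
    rw [List.mem_filter, List.mem_range] at hj
    have hjx : j ≤ x := by omega
    simp only [Function.comp]
    have e1 : 2 * x - (x + j) = x - j := by omega
    rw [e1]
    have : ((x - j : Nat) : Int) = (x : Int) - (j : Int) := by
      push_cast [Nat.cast_sub hjx]; ring
    rw [this]

lemma cells_filter (x : Nat) :
    ∀ (rows : List String) (y0 : Int),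
      ((PySem.List.enumerate rows y0).flatMap (fun p => rowCells p.1 p.2.toList)).filter
          (fun c => c.1 == (x : Int)) =
        (misFrom x rows y0).map (fun p => ((x : Int), p.1, p.2)) := by
  intro rows
  induction rows with
  | nil => intro y0; simp [PySem.List.enumerate_nil, misFrom]
  | cons r rs ih =>
    intro y0
    rw [PySem.List.enumerate_cons, List.flatMap_cons, List.filter_append, ih (y0 + 1)]
    rw [show (misFrom x (r :: rs) y0) = (misRow x r.toList).map
          (fun (j : Nat) => ((x : Int) - (j : Int), y0)) ++ misFrom x rs (y0 + 1) from rfl]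
    rw [List.map_append, rowCells_filter r.toList y0 x, List.map_map]
    rfl

lemma bScan_eq (block : List String) :
    ∀ l : List Nat,
      bScan (bCells block) (l.map (fun (k : Nat) => (k : Int))) =
        (match l.find? (fun x => (misFrom x block 0).length == 1) with
          | none => (false, 0, 0)
          | some x => (true, (misFrom x block 0).headI.1, (misFrom x block 0).headI.2)) := by
  intro l
  induction l with
  | nil => rfl
  | cons xn t ih =>
    rw [List.map_cons, bScan]
    have hfil : (bCells block).filter (fun c => c.1 == (xn : Int))
        = (misFrom xn block 0).map (fun p => ((xn : Int), p.1, p.2)) := by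
      rw [bCells_eq, cells_filter]
    simp only [hfil, List.length_map]
    by_cases hl : (misFrom xn block 0).length = 1
    · obtain ⟨p, hp⟩ := List.length_eq_one_iff.mp hl
      rw [List.find?_cons_of_pos (by simp [hl])]
      simp [hp]
    · rw [List.find?_cons_of_neg (by simp [hl]), if_neg (by simp [hl]), ih]

-- ===== VERDICT (by name: the statement is the Claim_ definition above) =====
theorem cleanHorizontal_spec : Claim_equal_cleanHorizontal := by
  unfold Claim_equal_cleanHorizontal
  intro block _ hpre
  obtain ⟨hne, hq⟩ := hpre
  unfold Spec_cleanHorizontal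
  cases block with
  | nil => exact absurd rfl hne
  | cons b0 bs =>
    have hrange : PySem.List.pyRange 0 ((PySem.Str.len b0 : Int) - 1) 1
        = (List.range (b0.toList.length - 1)).map (fun (k : Nat) => (k : Int)) := by
      rw [PySem.Str.len_eq]
      cases hlen : b0.toList.length with
      | zero => rfl
      | succ k =>
        have : ((k + 1 : Nat) : Int) - 1 = ((k : Nat) : Int) := by push_cast; ring
        rw [this, PySem.List.pyRange_zero_natCast, Nat.add_sub_cancel]
    have hA : cleanHorizontal (b0 :: bs)
        = (List.range (b0.toList.length - 1)).foldl
            (fun st x => if (misFrom x (b0 :: bs) 0).length == 1 then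
                (true, (misFrom x (b0 :: bs) 0).headI.1, (misFrom x (b0 :: bs) 0).headI.2)
              else st) (false, 0, 0) := by
      rw [cleanHorizontal, hrange, List.foldl_map]
      apply PySem.List.foldl_congr_mem
      intro acc xn _
      simp only [check_eq]
      by_cases hl : (misFrom xn (b0 :: bs) 0).length = 1
      · obtain ⟨p, hp⟩ := List.length_eq_one_iff.mp hl
        rw [hp]
        simp [List.foldl]
      · have h1 : ((misFrom xn (b0 :: bs) 0).foldl
            (fun st p => (st.1 + 1, p.1, p.2)) (0, 0, 0)).1
            = ((misFrom xn (b0 :: bs) 0).length : Int) := by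
          rw [foldl_count_fst]; ring
        have hc1 : (((misFrom xn (b0 :: bs) 0).foldl
            (fun st p => (st.1 + 1, p.1, p.2)) (0, 0, 0)).1 == (1 : Int)) = false := by
          rw [h1]
          simp only [beq_eq_false_iff_ne, ne_eq]
          intro hc
          exact hl (by exact_mod_cast hc)
        have hc2 : ((misFrom xn (b0 :: bs) 0).length == 1) = false := by
          simp [hl]
        simp only [hc1, hc2]
        rfl
    have hB : cleanHorizontal_alt (b0 :: bs)
        = (match (List.range (b0.toList.length - 1)).find?
              (fun x => (misFrom x (b0 :: bs) 0).length == 1) with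
            | none => (false, 0, 0)
            | some x => (true, (misFrom x (b0 :: bs) 0).headI.1,
                (misFrom x (b0 :: bs) 0).headI.2)) := by
      rw [cleanHorizontal_alt, hrange, bScan_eq]
    rw [hA, hB]
    exact foldl_last_eq_find _ _ _ hq
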